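-- pv_equiv track=rewrite | github.com/wjdtkdgns777/BaekJoon | 프로그래머스/3/12938. 최고의 집합/최고의 집합.py | solution
-- ===== SOURCE A (Python) =====
-- def solution(n, s):
--     if n > s:
--         return [-1]  # 조건을 만족하는 집합이 존재하지 않는 경우
--
--     # 기본값 설정
--     base_value = s // n  # 평균값
--     remainder = s % n  # 나머지
--
--     # 기본 집합 구성
--     answer = [base_value] * n
--
--     # 나머지를 집합의 원소들에 분배
--     for i in range(remainder):
--         answer[i] += 1
--
--     # 오름차순 정렬을 위한 정렬
--     answer.sort()
--
--     return answer
-- ===== SOURCE B (Python) =====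
-- def solution(n, s):
--     if n > s:
--         return [-1]
--     out = []
--     while n > 0:
--         q = s // n  # smallest remaining element: floor of the remaining average
--         out.append(q)
--         s -= q
--         n -= 1
--     return out
-- ===== Notes on version B (the rewrite author's own statement) =====
-- stated objective: alternative
-- what changed: B replaces A's divide-once/distribute-remainder/sort scheme with an iterative greedy peel: each step appends floor(remaining_sum / remaining_count) and subtracts it, producing the ascending answer directly with no remainder distribution and no sort.
import Mathlib
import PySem

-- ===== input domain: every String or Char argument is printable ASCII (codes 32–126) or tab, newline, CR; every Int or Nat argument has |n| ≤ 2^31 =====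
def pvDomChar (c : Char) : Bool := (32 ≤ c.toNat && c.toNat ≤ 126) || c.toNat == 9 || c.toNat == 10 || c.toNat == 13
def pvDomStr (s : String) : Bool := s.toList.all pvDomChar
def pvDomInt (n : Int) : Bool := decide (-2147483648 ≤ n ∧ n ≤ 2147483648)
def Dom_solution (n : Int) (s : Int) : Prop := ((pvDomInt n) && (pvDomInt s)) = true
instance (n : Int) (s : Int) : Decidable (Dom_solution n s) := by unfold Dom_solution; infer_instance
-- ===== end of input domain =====

-- B replaces A's divide-once/distribute/sort scheme with an iterative greedy peel
-- (append floor(remaining sum / remaining count), subtract, repeat), no sort (alternative).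

-- ===== PORT A =====
def solution (n : Int) (s : Int) : List Int :=
  if n > s then [-1]
  else
    let base_value := PySem.Int.floordiv s n
    let remainder := PySem.Int.mod s n
    let answer := PySem.List.pyRepeat [base_value] n
    let answer := (PySem.List.pyRange 0 remainder 1).foldl
      (fun acc i => PySem.List.pySetD acc i (PySem.List.pyGetD acc i 0 + 1)) answer
    PySem.List.sorted answer id false

-- ===== PORT B =====
-- the while-loop of Source B: state (n, s, out); it runs while n > 0, and n drops by 1
-- each pass, so the number of passes is n.toNat — made explicit as a structural counter
def solAltGo : Nat → Int → Int → List Int → List Int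
  | 0, _, _, out => out
  | k + 1, n, s, out =>
    let q := PySem.Int.floordiv s n
    solAltGo k (n - 1) (s - q) (out ++ [q])

def solution_alt (n : Int) (s : Int) : List Int :=
  if n > s then [-1]
  else solAltGo n.toNat n s []

-- ===== PRECONDITION & SPEC =====
-- Pre_ excludes exactly the inputs (n = 0 with 0 ≤ s) on which Python A raises ZeroDivisionError.
def Pre_solution (n : Int) (s : Int) : Prop := ¬ (n = 0 ∧ 0 ≤ s)
instance (n : Int) (s : Int) : Decidable (Pre_solution n s) := by unfold Pre_solution; infer_instance
def pvWitness_solution : Int × Int := (3, 7)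
def Spec_solution (n : Int) (s : Int) (out : List Int) : Prop := out = solution_alt n s
instance (n : Int) (s : Int) (out : List Int) : Decidable (Spec_solution n s out) := by unfold Spec_solution; infer_instance

-- ===== CLAIM (what is proved, stated in full; the proofs are below) =====
def Claim_equal_solution : Prop := ∀ (n : Int) (s : Int), Dom_solution n s → Pre_solution n s → Spec_solution n s (solution n s)

-- ===== LEMMAS AND PROOFS =====

-- A's loop: after processing range(0,r) the list is r copies of b+1 followed by N-r copies of b
lemma loop_invariant (b : Int) (N r : Nat) (h : r ≤ N) :
    (PySem.List.pyRange 0 (r : Int) 1).foldl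
      (fun acc i => PySem.List.pySetD acc i (PySem.List.pyGetD acc i 0 + 1))
      (List.replicate N b)
    = List.replicate r (b + 1) ++ List.replicate (N - r) b := by
  induction r with
  | zero => simp [PySem.List.pyRange_one_eq_nil]
  | succ r ih =>
    have hr : r ≤ N := Nat.le_of_succ_le h
    have hsplit : PySem.List.pyRange 0 ((r + 1 : Nat) : Int) 1
        = PySem.List.pyRange 0 (r : Int) 1 ++ [(r : Int)] := by
      have := PySem.List.pyRange_one_succ_right (a := 0) (b := (r : Int)) (by positivity)
      simpa using this
    rw [hsplit, List.foldl_append, ih hr]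
    simp only [List.foldl_cons, List.foldl_nil]
    have hlen1 : (List.replicate r (b + 1)).length = r := by simp
    have hget : PySem.List.pyGetD (List.replicate r (b + 1) ++ List.replicate (N - r) b) (r : Int) 0 = b := by
      have hrN : r < (List.replicate r (b + 1) ++ List.replicate (N - r) b).length := by
        simp; omega
      rw [PySem.List.pyGetD_natCast]
      rw [List.getD_eq_getElem _ _ hrN]
      rw [List.getElem_append_right (by simp)]
      simp
    rw [hget, PySem.List.pySetD_natCast]
    rw [List.set_append]
    simp only [hlen1, lt_irrefl, if_false, Nat.sub_self]
    have hNr : N - r = (N - (r + 1)) + 1 := by omega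
    rw [hNr, List.replicate_succ, List.set_cons_zero]
    rw [show List.replicate r (b+1) ++ (b+1) :: List.replicate (N - (r+1)) b
          = (List.replicate r (b+1) ++ [b+1]) ++ List.replicate (N - (r+1)) b by simp]
    rw [← List.replicate_succ']

lemma sorted_two_blocks (b : Int) (r m : Nat) :
    PySem.List.sorted (List.replicate r (b + 1) ++ List.replicate m b) id false
    = List.replicate m b ++ List.replicate r (b + 1) := by
  have hperm : (PySem.List.sorted (List.replicate r (b + 1) ++ List.replicate m b) id false).Perm
      (List.replicate m b ++ List.replicate r (b + 1)) :=
    (PySem.List.sorted_perm _ _ _).trans List.perm_append_comm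
  have h1 : (PySem.List.sorted (List.replicate r (b + 1) ++ List.replicate m b) id false).Pairwise
      (fun x y : Int => x ≤ y) := by
    simpa using PySem.List.sorted_pairwise (List.replicate r (b + 1) ++ List.replicate m b) (id : Int → Int)
  have h2 : (List.replicate m b ++ List.replicate r (b + 1)).Pairwise (fun x y : Int => x ≤ y) := by
    rw [List.pairwise_append]
    refine ⟨List.pairwise_replicate.2 (by simp), List.pairwise_replicate.2 (by simp), ?_⟩
    intro x hx y hy
    rw [List.eq_of_mem_replicate hx, List.eq_of_mem_replicate hy]
    omega
  exact List.Perm.eq_of_pairwise (fun a b _ _ hab hba => le_antisymm hab hba) h1 h2 hperm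

-- B's greedy loop computes the two sorted blocks directly
lemma solAltGo_spec (n s : Int) (out : List Int) (h1 : 0 < n) (h2 : n ≤ s) :
    solAltGo n.toNat n s out
      = out ++ (List.replicate (n - PySem.Int.mod s n).toNat (PySem.Int.floordiv s n)
             ++ List.replicate (PySem.Int.mod s n).toNat (PySem.Int.floordiv s n + 1)) := by
  induction hk : n.toNat generalizing n s out with
  | zero => omega
  | succ k ih =>
    rw [solAltGo]
    set q := PySem.Int.floordiv s n with hq
    set r := PySem.Int.mod s n with hr
    have hqnr : q * n + r = s := PySem.Int.floordiv_mul_add_mod s n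
    have hr0 : 0 ≤ r := PySem.Int.mod_nonneg (a := s) h1
    have hrn : r < n := PySem.Int.mod_lt (a := s) h1
    have hqn_pos : 0 < q * n := by omega
    have hq1 : 1 ≤ q := by nlinarith
    by_cases hn1 : n = 1
    · -- last iteration
      have hr0' : r = 0 := by omega
      have hk0 : k = 0 := by omega
      rw [hk0]
      simp [solAltGo, hn1, hr0']
    · have hn2 : 2 ≤ n := by omega
      have hsq : s - q = q * (n - 1) + r := by ring_nf; omega
      have hle : n - 1 ≤ s - q := by nlinarith
      have hrec := ih (n - 1) (s - q) (out ++ [q]) (by omega) hle (by omega)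
      rw [hrec]
      by_cases hcase : r = n - 1
      · -- remainder fills all remaining slots: next quotient is q+1, next remainder 0
        have hq' : PySem.Int.floordiv (s - q) (n - 1) = q + 1 := by
          rw [PySem.Int.floordiv_eq_iff_of_pos (by omega)]
          constructor <;> nlinarith
        have hr' : PySem.Int.mod (s - q) (n - 1) = 0 := by
          have := PySem.Int.floordiv_mul_add_mod (s - q) (n - 1)
          rw [hq'] at this; nlinarith
        rw [hq', hr']
        have h1' : (n - 1 - (0:Int)).toNat = r.toNat := by omega
        have h2' : (n - r).toNat = 1 := by omega
        simp [h2', List.replicate_succ]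
        omega
      · -- next quotient stays q, next remainder stays r
        have hrlt : r ≤ n - 2 := by omega
        have hq' : PySem.Int.floordiv (s - q) (n - 1) = q := by
          rw [PySem.Int.floordiv_eq_iff_of_pos (by omega)]
          constructor <;> nlinarith
        have hr' : PySem.Int.mod (s - q) (n - 1) = r := by
          have := PySem.Int.floordiv_mul_add_mod (s - q) (n - 1)
          rw [hq'] at this; nlinarith
        rw [hq', hr']
        have h1' : (n - r).toNat = (n - 1 - r).toNat + 1 := by omega
        simp [h1', List.replicate_succ]

-- ===== VERDICT (by name: the statement is the Claim_ definition above) =====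
theorem solution_spec : Claim_equal_solution := by
  intro n s _ hpre
  unfold Spec_solution solution solution_alt
  by_cases hns : n > s
  · simp [hns]
  · simp only [if_neg hns]
    replace hns : n ≤ s := le_of_not_gt hns
    set b := PySem.Int.floordiv s n with hb
    set r := PySem.Int.mod s n with hr
    rcases lt_trichotomy n 0 with hneg | hzero | hpos
    · -- n < 0 : everything empty on both sides
      have hbounds := PySem.Int.mod_neg_bounds (a := s) hneg
      have h1 : PySem.List.pyRepeat [b] n = [] := by
        rw [PySem.List.pyRepeat_singleton]
        have : n.toNat = 0 := by omega
        simp [this]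
      have h2 : PySem.List.pyRange 0 r 1 = [] :=
        PySem.List.pyRange_one_eq_nil (by omega)
      rw [h1, h2, show n.toNat = 0 from by omega]
      simp [solAltGo, PySem.List.sorted]
    · exact absurd ⟨hzero, hzero ▸ hns⟩ hpre
    · -- 0 < n
      have h0r : 0 ≤ r := PySem.Int.mod_nonneg (a := s) hpos
      have hrn : r < n := PySem.Int.mod_lt (a := s) hpos
      have hle : r.toNat ≤ n.toNat := by omega
      rw [PySem.List.pyRepeat_singleton]
      rw [show r = (r.toNat : Int) from by omega] 
      rw [loop_invariant b n.toNat r.toNat hle, sorted_two_blocks]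
      rw [solAltGo_spec n s [] hpos hns]
      simp only [List.nil_append, ← hb, ← hr]
      congr 2
      omega
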